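-- pv_equiv track=rewrite | github.com/Yulufu/pawsitive-match-finder-chat | backend/src/zestie_matcher/scrapers/muddy_paws.py | attribute_flags
-- ===== SOURCE A (Python) =====
-- from typing import Callable, Iterable, List, Optional
--
-- def attribute_flags(attrs: List[str]) -> dict:
--     lowered = [attr.lower() for attr in attrs]
--     special_keywords = ("heartworm", "medical", "special", "paralyzed", "seizure", "neurological")
--     solo_keywords = ("solo dog", "only dog", "solo pup")
--     return {
--         "trial": any("trial adoption candidate" in attr for attr in lowered),
--         "foster": any("foster to adopt candidate" in attr for attr in lowered),
--         "needs_special_care": any(keyword in attr for keyword in special_keywords for attr in lowered),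
--         "quiet": any("quiet neighborhood" in attr for attr in lowered),
--         "bonded": any("bonded pair" in attr for attr in lowered),
--         "experienced": any("experienced" in attr for attr in lowered),
--         "solo": any(keyword in attr for keyword in solo_keywords for attr in lowered),
--     }
-- ===== SOURCE B (Python) =====
-- _TABLE = (
--     ("trial adoption candidate", "trial"),
--     ("foster to adopt candidate", "foster"),
--     ("heartworm", "needs_special_care"),
--     ("medical", "needs_special_care"),
--     ("special", "needs_special_care"),
--     ("paralyzed", "needs_special_care"),
--     ("seizure", "needs_special_care"),
--     ("neurological", "needs_special_care"),
--     ("quiet neighborhood", "quiet"),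
--     ("bonded pair", "bonded"),
--     ("experienced", "experienced"),
--     ("solo dog", "solo"),
--     ("only dog", "solo"),
--     ("solo pup", "solo"),
-- )
--
-- _KEYS = ("trial", "foster", "needs_special_care", "quiet", "bonded", "experienced", "solo")
--
--
-- def attribute_flags(attrs):
--     hit = set()
--     for attr in attrs:
--         a = attr.lower()
--         for phrase, flag in _TABLE:
--             if phrase in a:
--                 hit.add(flag)
--     return {k: k in hit for k in _KEYS}
-- ===== Notes on version B (the rewrite author's own statement) =====
-- stated objective: alternative
-- what changed: Replaced seven independent any()-scans by a table-driven matcher: one flat (phrase, flag) table, a single pass collecting hit flags into a set, and the result dict built by set membership.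
import Mathlib
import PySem

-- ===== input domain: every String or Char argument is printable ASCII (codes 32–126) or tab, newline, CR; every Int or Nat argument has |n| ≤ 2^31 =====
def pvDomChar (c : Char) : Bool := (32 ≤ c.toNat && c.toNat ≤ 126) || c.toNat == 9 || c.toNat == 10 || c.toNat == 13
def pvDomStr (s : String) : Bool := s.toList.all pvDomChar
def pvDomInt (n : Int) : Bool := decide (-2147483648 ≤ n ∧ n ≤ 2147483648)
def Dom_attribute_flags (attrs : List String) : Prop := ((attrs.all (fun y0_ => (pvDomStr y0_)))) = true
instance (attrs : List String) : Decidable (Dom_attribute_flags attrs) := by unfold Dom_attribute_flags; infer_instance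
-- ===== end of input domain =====

-- B is table-driven: one flat (phrase, flag) table scanned in a single pass that collects hit flags into a set; the dict is built by set membership (alternative decomposition, same results).

-- ===== PORT A =====
def attribute_flags (attrs : List String) : List (String × Bool) :=
  let lowered := attrs.map PySem.Str.lower
  let special_keywords := ["heartworm", "medical", "special", "paralyzed", "seizure", "neurological"]
  let solo_keywords := ["solo dog", "only dog", "solo pup"]
  [("trial", lowered.any (fun attr => PySem.Str.isIn "trial adoption candidate" attr)),
   ("foster", lowered.any (fun attr => PySem.Str.isIn "foster to adopt candidate" attr)),
   ("needs_special_care", special_keywords.any (fun keyword => lowered.any (fun attr => PySem.Str.isIn keyword attr))),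
   ("quiet", lowered.any (fun attr => PySem.Str.isIn "quiet neighborhood" attr)),
   ("bonded", lowered.any (fun attr => PySem.Str.isIn "bonded pair" attr)),
   ("experienced", lowered.any (fun attr => PySem.Str.isIn "experienced" attr)),
   ("solo", solo_keywords.any (fun keyword => lowered.any (fun attr => PySem.Str.isIn keyword attr)))]

-- ===== PORT B =====
def pvTable : List (String × String) :=
  [("trial adoption candidate", "trial"),
   ("foster to adopt candidate", "foster"),
   ("heartworm", "needs_special_care"),
   ("medical", "needs_special_care"),
   ("special", "needs_special_care"),
   ("paralyzed", "needs_special_care"),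
   ("seizure", "needs_special_care"),
   ("neurological", "needs_special_care"),
   ("quiet neighborhood", "quiet"),
   ("bonded pair", "bonded"),
   ("experienced", "experienced"),
   ("solo dog", "solo"),
   ("only dog", "solo"),
   ("solo pup", "solo")]

def pvKeys : List String :=
  ["trial", "foster", "needs_special_care", "quiet", "bonded", "experienced", "solo"]

def attribute_flags_alt (attrs : List String) : List (String × Bool) :=
  let hit : PySem.Set String := attrs.foldl
    (fun hit attr =>
      let a := PySem.Str.lower attr
      pvTable.foldl (fun hit pf => if PySem.Str.isIn pf.1 a then PySem.Set.add hit pf.2 else hit) hit)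
    PySem.Set.empty
  pvKeys.map (fun k => (k, hit.contains k))

-- ===== PRECONDITION & SPEC =====
def Spec_attribute_flags (attrs : List String) (out : List (String × Bool)) : Prop := out = attribute_flags_alt attrs
instance (attrs : List String) (out : List (String × Bool)) : Decidable (Spec_attribute_flags attrs out) := by unfold Spec_attribute_flags; infer_instance

-- ===== CLAIM =====
def Claim_equal_attribute_flags : Prop := ∀ (attrs : List String), Dom_attribute_flags attrs → Spec_attribute_flags attrs (attribute_flags attrs)

-- ===== LEMMAS AND PROOFS =====

theorem contains_add (h : PySem.Set String) (x k : String) :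
    (PySem.Set.add h x).contains k = (h.contains k || x == k) := by
  rw [Bool.eq_iff_iff]
  simp [PySem.Set.mem_add, beq_iff_eq]
  tauto

-- inner table scan: membership after the scan = previous membership OR some matching table row
theorem inner_fold_contains (table : List (String × String)) (h : PySem.Set String) (a k : String) :
    (table.foldl (fun hit pf => if PySem.Str.isIn pf.1 a then PySem.Set.add hit pf.2 else hit) h).contains k
    = (h.contains k || table.any (fun pf => PySem.Str.isIn pf.1 a && pf.2 == k)) := by
  induction table generalizing h with
  | nil => simp
  | cons p t ih =>
    simp only [List.foldl_cons, List.any_cons]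
    by_cases hp : PySem.Str.isIn p.1 a = true
    · rw [if_pos hp, ih, contains_add, hp]
      rw [Bool.eq_iff_iff]
      simp only [Bool.or_eq_true, Bool.and_eq_true, true_and]
      tauto
    · rw [if_neg hp, ih]
      simp only [Bool.not_eq_true] at hp
      rw [hp]
      simp

-- outer pass: membership after the whole pass = some attr produces a matching table row
theorem outer_fold_contains (attrs : List String) (h : PySem.Set String) (k : String) :
    (attrs.foldl
      (fun hit attr =>
        pvTable.foldl (fun hit pf => if PySem.Str.isIn pf.1 (PySem.Str.lower attr) then PySem.Set.add hit pf.2 else hit) hit)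
      h).contains k
    = (h.contains k || attrs.any (fun attr => pvTable.any (fun pf => PySem.Str.isIn pf.1 (PySem.Str.lower attr) && pf.2 == k))) := by
  induction attrs generalizing h with
  | nil => simp
  | cons a t ih =>
    simp only [List.foldl_cons, List.any_cons, ih, inner_fold_contains]
    simp [Bool.or_assoc]

-- 'any' distributes over '||' of predicates
theorem any_or_distrib (l : List String) (p q : String → Bool) :
    (l.any p || l.any q) = l.any (fun a => p a || q a) := by
  rw [Bool.eq_iff_iff]
  simp only [Bool.or_eq_true, List.any_eq_true]
  aesop

-- ===== VERDICT =====
theorem attribute_flags_spec : Claim_equal_attribute_flags := by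
  intro attrs _
  show attribute_flags attrs = attribute_flags_alt attrs
  unfold attribute_flags attribute_flags_alt
  simp only [pvKeys, List.map_cons, List.map_nil, outer_fold_contains]
  simp only [pvTable, List.any_cons, List.any_nil, List.any_map]
  simp [Function.comp_def, any_or_distrib]
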